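-- pv_equiv track=rewrite | github.com/cfillies/semkibardoc | extractMetadata/Vorhaben/relateVorhaben.py | getVorhabenListFuerDirectory
-- ===== SOURCE A (Python) =====
-- def getVorhabenListFuerDirectory(pfad, vorhDict, subdirectories):
--     moeglVorhList = []
--     moeglOrtList = []
--
--     try:
--         for key in vorhDict[pfad]:
--             for innerkey in vorhDict[pfad][key].keys():
--                 vorhList = list(vorhDict[pfad][key][innerkey]['vorhaben'].keys())
--                 moeglVorhList.extend(vorhList)
--
--             if moeglVorhList:
--                 moeglOrtList.append(key)
--     except:
--         dummy = 9999
--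
--     if not moeglVorhList:
--
--         # Kein Vorhaben in dem Ordner vorhanden, der übergeordnete Ordner wird überprüft
--         higherDir = pfad.rsplit('\\', 1)[0]  # move one directory higher
--
--         while (higherDir in subdirectories) and (moeglVorhList == []):
--             try:
--                 for key in vorhDict[higherDir]:
--                     for innerkey in vorhDict[higherDir][key].keys():
--                         vorhList = list(vorhDict[higherDir][key][innerkey]['vorhaben'].keys())
--                         moeglVorhList.extend(vorhList)
--
--                     if moeglVorhList:
--                         moeglOrtList.append(key)
--             except:
--                 dummy = 9999
--
--             higherDir = higherDir.rsplit('\\', 1)[0]  # move one directory higher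
--
--     # Nun steht mit dem aktuellen Ordner mindestens ein Vorhaben in Bezug.
--     # Im folgenden wird gefrüft, welches der Vorhaben am ehesten zu jedem Dokument passt
--     return moeglVorhList, moeglOrtList
-- ===== SOURCE B (Python) =====
-- def _scan(table):
--     """Collect all vorhaben names in one directory table, together with the
--     keys recorded as Orte (a key is recorded once any names have been seen)."""
--     vorh, orte = [], []
--     try:
--         for key, entry in table.items():
--             for inner in entry.values():
--                 vorh += inner['vorhaben']
--             if vorh:
--                 orte.append(key)
--     except KeyError:
--         pass
--     return vorh, orte
--
--
-- def getVorhabenListFuerDirectory(pfad, vorhDict, subdirectories):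
--     # directories to examine: pfad itself, then each parent while it is a known subdirectory
--     directories = [pfad]
--     d = pfad
--     while True:
--         parent = d.rsplit('\\', 1)[0]
--         if parent == d or parent not in subdirectories:
--             break
--         directories.append(parent)
--         d = parent
--     # first directory whose scan yields any vorhaben wins
--     for d in directories:
--         if d in vorhDict:
--             vorh, orte = _scan(vorhDict[d])
--             if vorh:
--                 return vorh, orte
--     return [], []
-- ===== Notes on version B (the rewrite author's own statement) =====
-- stated objective: alternative
-- what changed: B replaces A's two copy-pasted scanning blocks and the stateful while-loop by first building the list of directories to examine (pfad, then each parent while it is in subdirectories) and then returning the first non-empty result of a single pure per-directory scan that iterates items()/values() instead of keys plus repeated subscripting; Pre_ excludes association lists with duplicate keys (not representable as a Python dict) and inputs whose backslash-free root of pfad lies in subdirectories, where A's while-loop can loop forever.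
import Mathlib
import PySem

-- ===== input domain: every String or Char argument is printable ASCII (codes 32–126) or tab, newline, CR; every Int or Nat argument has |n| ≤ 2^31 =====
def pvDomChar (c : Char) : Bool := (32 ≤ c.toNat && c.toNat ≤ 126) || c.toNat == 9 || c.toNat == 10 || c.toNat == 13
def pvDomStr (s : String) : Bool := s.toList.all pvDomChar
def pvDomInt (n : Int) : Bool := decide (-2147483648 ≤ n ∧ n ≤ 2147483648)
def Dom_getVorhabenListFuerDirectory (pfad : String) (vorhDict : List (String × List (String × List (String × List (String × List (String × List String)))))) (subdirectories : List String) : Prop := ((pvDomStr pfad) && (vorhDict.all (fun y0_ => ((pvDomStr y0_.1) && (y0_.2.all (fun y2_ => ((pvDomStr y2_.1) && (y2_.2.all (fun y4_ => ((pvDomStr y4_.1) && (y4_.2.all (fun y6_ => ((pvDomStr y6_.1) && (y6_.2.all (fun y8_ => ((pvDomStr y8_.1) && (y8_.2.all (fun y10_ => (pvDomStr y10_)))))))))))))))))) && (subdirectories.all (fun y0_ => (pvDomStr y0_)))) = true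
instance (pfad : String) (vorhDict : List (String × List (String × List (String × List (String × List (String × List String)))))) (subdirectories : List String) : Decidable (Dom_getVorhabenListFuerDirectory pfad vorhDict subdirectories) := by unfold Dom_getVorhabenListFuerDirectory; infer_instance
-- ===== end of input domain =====

-- B precomputes the directory chain (pfad, then parents while in subdirectories) and returns the
-- first non-empty result of one pure per-directory scan over items()/values(), replacing A's two
-- duplicated stateful blocks and mutating while-loop (objective: alternative decomposition, same cost).


-- shared primitives: Python dict lookup / key iteration on the assoc-list representation,
-- and s.rsplit('\\', 1)[0] (PySem has no rsplit; hand port, exact for every string)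
def pvLookup {α : Type} (m : List (String × α)) (k : String) : Option α :=
  (PySem.Dict.mk m).get? k

def pvKeys {α : Type} (m : List (String × α)) : List String :=
  (PySem.Dict.mk m).keys

-- prefix of cs before its LAST backslash; none when cs has no backslash (= rsplit keeps cs whole)
def pvParentC : List Char → Option (List Char)
  | [] => none
  | c :: cs =>
    match pvParentC cs with
    | some p => some (c :: p)
    | none => if c = '\\' then some [] else none

def pvRsplit1 (s : String) : String :=
  match pvParentC s.toList with
  | none => s
  | some p => String.ofList p

theorem pvParentC_some_length (cs : List Char) (p : List Char) (h : pvParentC cs = some p) :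
    p.length < cs.length := by
  induction cs generalizing p with
  | nil => simp [pvParentC] at h
  | cons c cs ih =>
    rw [pvParentC] at h
    cases hc : pvParentC cs with
    | some q =>
      rw [hc] at h
      cases h
      simpa using ih q hc
    | none =>
      rw [hc] at h
      by_cases hb : c = '\\' <;> simp [hb] at h
      subst h; simp

theorem pvRsplit1_ne_length (s : String) (h : pvRsplit1 s ≠ s) :
    (pvRsplit1 s).toList.length < s.toList.length := by
  unfold pvRsplit1 at *
  cases hp : pvParentC s.toList with
  | none => rw [hp] at h; exact absurd rfl h
  | some p =>
    simpa using pvParentC_some_length s.toList p hp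

-- ===== PORT A =====
-- inner 'for innerkey in vorhDict[d][key].keys()' of A: threads moeglVorhList, Bool=false on KeyError
def pvA_inner (entry : List (String × List (String × List (String × List String))))
    (iks : List String) (V : List String) : List String × Bool :=
  match iks with
  | [] => (V, true)
  | ik :: rest =>
    match pvLookup entry ik with
    | none => (V, false)
    | some sub =>
      match pvLookup sub "vorhaben" with
      | none => (V, false)
      | some vd => pvA_inner entry rest (V ++ pvKeys vd)

-- 'for key in vorhDict[d]' of A: threads both lists; an exception aborts keeping the partial state
def pvA_keyLoop (m : List (String × List (String × List (String × List (String × List String)))))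
    (ks : List String) (V O : List String) : List String × List String :=
  match ks with
  | [] => (V, O)
  | k :: rest =>
    match pvLookup m k with
    | none => (V, O)
    | some entry =>
      match pvA_inner entry (pvKeys entry) V with
      | (V', false) => (V', O)
      | (V', true) => pvA_keyLoop m rest V' (if V'.isEmpty then O else O ++ [k])

-- one try-block of A: KeyError on vorhDict[d] is caught leaving the state unchanged
def pvA_processDir (vorhDict : List (String × List (String × List (String × List (String × List (String × List String)))))) (d : String) (V O : List String) : List String × List String :=
  match pvLookup vorhDict d with
  | none => (V, O)
  | some m => pvA_keyLoop m (pvKeys m) V O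

-- A's while-loop; when rsplit no longer shortens (its fixed point) Python either exits with the same
-- value (moeglVorhList non-empty) or diverges — the latter is excluded by Pre_ below
def pvA_while (vorhDict : List (String × List (String × List (String × List (String × List (String × List String)))))) (subdirectories : List String) (h : String) (V O : List String) : List String × List String :=
  if subdirectories.contains h && V.isEmpty then
    if _hlt : (pvRsplit1 h).toList.length < h.toList.length then
      pvA_while vorhDict subdirectories (pvRsplit1 h)
        (pvA_processDir vorhDict h V O).1 (pvA_processDir vorhDict h V O).2
    else pvA_processDir vorhDict h V O
  else (V, O)
termination_by h.toList.length

def getVorhabenListFuerDirectory (pfad : String) (vorhDict : List (String × List (String × List (String × List (String × List (String × List String)))))) (subdirectories : List String) : List String × List String :=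
  if (pvA_processDir vorhDict pfad [] []).1.isEmpty then
    pvA_while vorhDict subdirectories (pvRsplit1 pfad)
      (pvA_processDir vorhDict pfad [] []).1 (pvA_processDir vorhDict pfad [] []).2
  else pvA_processDir vorhDict pfad [] []

-- ===== PORT B =====
-- dict items() / values() of Source B on the assoc-list representation
def pvItems {α : Type} (m : List (String × α)) : List (String × α) :=
  (PySem.Dict.mk m).items

def pvValues {α : Type} (m : List (String × α)) : List α :=
  (PySem.Dict.mk m).values

-- Source B's "for inner in entry.values(): vorh += inner['vorhaben']"; Bool=false on KeyError
def pvB_inner (vals : List (List (String × List (String × List String)))) (vorh : List String) : List String × Bool :=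
  match vals with
  | [] => (vorh, true)
  | inner :: rest =>
    match pvLookup inner "vorhaben" with
    | none => (vorh, false)
    | some vd => pvB_inner rest (vorh ++ pvKeys vd)

-- Source B's "for key, entry in table.items()" of _scan; a KeyError truncates, keeping the partial lists
def pvB_scanItems (its : List (String × List (String × List (String × List (String × List String)))))
    (vorh orte : List String) : List String × List String :=
  match its with
  | [] => (vorh, orte)
  | (k, entry) :: rest =>
    match pvB_inner (pvValues entry) vorh with
    | (v', false) => (v', orte)
    | (v', true) => pvB_scanItems rest v' (if v'.isEmpty then orte else orte ++ [k])

-- _scan of Source B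
def pvB_scan (m : List (String × List (String × List (String × List (String × List String))))) : List String × List String :=
  pvB_scanItems (pvItems m) [] []

-- Source B's first loop: the list of directories to examine
def pvB_chain (subdirs : List String) (d : String) : List String :=
  d :: (if h : pvRsplit1 d = d ∨ ¬ subdirs.contains (pvRsplit1 d) then []
        else pvB_chain subdirs (pvRsplit1 d))
termination_by d.toList.length
decreasing_by exact pvRsplit1_ne_length d (by push_neg at h; exact h.1)

-- Source B's second loop: first directory whose scan yields any vorhaben wins
def pvB_find (vorhDict : List (String × List (String × List (String × List (String × List (String × List String)))))) : List String → List String × List String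
  | [] => ([], [])
  | d :: rest =>
    match pvLookup vorhDict d with
    | none => pvB_find vorhDict rest
    | some m =>
      if (pvB_scan m).1.isEmpty then pvB_find vorhDict rest else pvB_scan m

def getVorhabenListFuerDirectory_alt (pfad : String) (vorhDict : List (String × List (String × List (String × List (String × List (String × List String)))))) (subdirectories : List String) : List String × List String :=
  pvB_find vorhDict (pvB_chain subdirectories pfad)

-- ===== PRECONDITION & SPEC =====
-- Pre_ excludes (a) association lists with duplicate keys at the two levels the programs iterate
-- (no Python dict has duplicate keys, so these lists represent no input of A; A iterates keys with
-- first-match lookup, B iterates the pairs) and (b) inputs whose backslash-free root of pfad (the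
-- fixed point of rsplit('\\',1)[0]) is in subdirectories: there A's while-loop can loop forever.
def Pre_getVorhabenListFuerDirectory (pfad : String) (vorhDict : List (String × List (String × List (String × List (String × List (String × List String)))))) (subdirectories : List String) : Prop :=
  (∀ p ∈ vorhDict, (p.2.map Prod.fst).Nodup ∧ ∀ q ∈ p.2, (q.2.map Prod.fst).Nodup) ∧
  String.ofList (pfad.toList.takeWhile (fun c => c ≠ '\\')) ∉ subdirectories
instance (pfad : String) (vorhDict : List (String × List (String × List (String × List (String × List (String × List String)))))) (subdirectories : List String) : Decidable (Pre_getVorhabenListFuerDirectory pfad vorhDict subdirectories) := by unfold Pre_getVorhabenListFuerDirectory; infer_instance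

def pvWitness_getVorhabenListFuerDirectory : String × (List (String × List (String × List (String × List (String × List (String × List String)))))) × List String :=
  ("a\\b", [("a\\b", [("k", [("i", [("vorhaben", [("v", [])])])])])], ["a\\b"])

def Spec_getVorhabenListFuerDirectory (pfad : String) (vorhDict : List (String × List (String × List (String × List (String × List (String × List String)))))) (subdirectories : List String) (out : List String × List String) : Prop := out = getVorhabenListFuerDirectory_alt pfad vorhDict subdirectories
instance (pfad : String) (vorhDict : List (String × List (String × List (String × List (String × List (String × List String)))))) (subdirectories : List String) (out : List String × List String) : Decidable (Spec_getVorhabenListFuerDirectory pfad vorhDict subdirectories out) := by unfold Spec_getVorhabenListFuerDirectory; infer_instance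

-- ===== CLAIM (what is proved, stated in full; the proofs are below) =====
def Claim_equal_getVorhabenListFuerDirectory : Prop := ∀ (pfad : String) (vorhDict : List (String × List (String × List (String × List (String × List (String × List String)))))) (subdirectories : List String), Dom_getVorhabenListFuerDirectory pfad vorhDict subdirectories → Pre_getVorhabenListFuerDirectory pfad vorhDict subdirectories → Spec_getVorhabenListFuerDirectory pfad vorhDict subdirectories (getVorhabenListFuerDirectory pfad vorhDict subdirectories)

-- ===== LEMMAS AND PROOFS =====

theorem pvLookup_cons {α : Type} (k : String) (v : α) (rest : List (String × α)) (x : String) :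
    pvLookup ((k, v) :: rest) x = if k == x then some v else pvLookup rest x := by
  simp [pvLookup, PySem.Dict.get?_mk_cons]

theorem pvKeys_eq {α : Type} (m : List (String × α)) : pvKeys m = m.map Prod.fst := by
  simp [pvKeys, PySem.Dict.keys]

theorem pvItems_eq {α : Type} (m : List (String × α)) : pvItems m = m := rfl

theorem pvValues_eq {α : Type} (m : List (String × α)) : pvValues m = m.map Prod.snd := by
  simp [pvValues, PySem.Dict.values]

-- A's inner loop only depends on the lookups of the keys it visits
theorem pvA_inner_congr (e e' : List (String × List (String × List (String × List String))))
    (iks : List String) (V : List String)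
    (h : ∀ k ∈ iks, pvLookup e k = pvLookup e' k) :
    pvA_inner e iks V = pvA_inner e' iks V := by
  induction iks generalizing V with
  | nil => rfl
  | cons ik rest ih =>
    have h0 := h ik (by simp)
    cases h1 : pvLookup e' ik with
    | none => simp [pvA_inner, h0, h1]
    | some sub =>
      cases h2 : pvLookup sub "vorhaben" with
      | none => simp [pvA_inner, h0, h1, h2]
      | some vd =>
        simp only [pvA_inner, h0, h1, h2]
        exact ih _ (fun k hk => h k (by simp [hk]))

-- A's key-wise inner loop over entry's keys is B's fold over entry's values (unique keys)
theorem pvA_inner_map (entry : List (String × List (String × List (String × List String))))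
    (hnd : (entry.map Prod.fst).Nodup) (V : List String) :
    pvA_inner entry (entry.map Prod.fst) V = pvB_inner (entry.map Prod.snd) V := by
  induction entry generalizing V with
  | nil => rfl
  | cons p rest ih =>
    obtain ⟨ik, sub⟩ := p
    rw [List.map_cons] at hnd
    have hnotin : ik ∉ rest.map Prod.fst := (List.nodup_cons.mp hnd).1
    have hnd' : (rest.map Prod.fst).Nodup := (List.nodup_cons.mp hnd).2
    have hcongr : ∀ k ∈ rest.map Prod.fst, pvLookup ((ik, sub) :: rest) k = pvLookup rest k := by
      intro k hk
      rw [pvLookup_cons, if_neg]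
      simp only [beq_iff_eq]
      intro he; exact hnotin (he ▸ hk)
    cases h2 : pvLookup sub "vorhaben" with
    | none => simp [pvA_inner, pvB_inner, pvLookup_cons, h2]
    | some vd =>
      simp only [List.map_cons, pvA_inner, pvB_inner, pvLookup_cons, beq_self_eq_true, if_true, h2]
      rw [pvA_inner_congr _ rest _ _ hcongr]
      exact ih hnd' _

-- A's outer key loop only depends on the lookups of the keys it visits
theorem pvA_keyLoop_congr (m m' : List (String × List (String × List (String × List (String × List String)))))
    (ks : List String) (V O : List String)
    (h : ∀ k ∈ ks, pvLookup m k = pvLookup m' k) :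
    pvA_keyLoop m ks V O = pvA_keyLoop m' ks V O := by
  induction ks generalizing V O with
  | nil => rfl
  | cons k rest ih =>
    have h0 := h k (by simp)
    cases h1 : pvLookup m' k with
    | none => simp [pvA_keyLoop, h0, h1]
    | some entry =>
      cases h2 : pvA_inner entry (pvKeys entry) V with
      | mk V' b =>
        cases b with
        | false => simp [pvA_keyLoop, h0, h1, h2]
        | true =>
          simp only [pvA_keyLoop, h0, h1, h2]
          exact ih _ _ (fun k hk => h k (by simp [hk]))

-- A's key loop over the table's keys is B's scan over its items (unique keys at both levels)
theorem pvA_keyLoop_map (m : List (String × List (String × List (String × List (String × List String)))))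
    (hnd : (m.map Prod.fst).Nodup) (hin : ∀ q ∈ m, (q.2.map Prod.fst).Nodup) (V O : List String) :
    pvA_keyLoop m (m.map Prod.fst) V O = pvB_scanItems m V O := by
  induction m generalizing V O with
  | nil => rfl
  | cons p rest ih =>
    obtain ⟨k, entry⟩ := p
    rw [List.map_cons] at hnd
    have hnotin : k ∉ rest.map Prod.fst := (List.nodup_cons.mp hnd).1
    have hnd' : (rest.map Prod.fst).Nodup := (List.nodup_cons.mp hnd).2
    have hcongr : ∀ x ∈ rest.map Prod.fst, pvLookup ((k, entry) :: rest) x = pvLookup rest x := by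
      intro x hx
      rw [pvLookup_cons, if_neg]
      simp only [beq_iff_eq]
      intro he; exact hnotin (he ▸ hx)
    have hA := pvA_inner_map entry (hin (k, entry) (by simp)) V
    cases h2 : pvB_inner (entry.map Prod.snd) V with
    | mk V' b =>
      cases b with
      | false =>
        simp [pvA_keyLoop, pvB_scanItems, pvLookup_cons, pvKeys_eq, pvValues_eq, hA, h2]
      | true =>
        simp only [List.map_cons, pvA_keyLoop, pvB_scanItems, pvLookup_cons, beq_self_eq_true,
          if_true, pvKeys_eq, pvValues_eq, hA, h2]
        rw [pvA_keyLoop_congr _ rest _ _ _ hcongr]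
        exact ih hnd' (fun q hq => hin q (by simp [hq])) _ _

-- one try-block of A from the empty state is B's pure scan
theorem pvA_processDir_eq (vorhDict : List (String × List (String × List (String × List (String × List (String × List String)))))) (d : String)
    (hpre : ∀ p ∈ vorhDict, (p.2.map Prod.fst).Nodup ∧ ∀ q ∈ p.2, (q.2.map Prod.fst).Nodup) :
    pvA_processDir vorhDict d [] [] =
      match pvLookup vorhDict d with
      | none => ([], [])
      | some m => pvB_scan m := by
  cases hl : pvLookup vorhDict d with
  | none => simp [pvA_processDir, hl]
  | some m =>
    have hl' : (PySem.Dict.mk vorhDict).get? d = some m := hl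
    have hmem : (d, m) ∈ vorhDict := by
      simpa [PySem.Dict.items] using PySem.Dict.mem_items_of_get?_eq_some _ hl' 
    obtain ⟨hnd, hin⟩ := hpre (d, m) hmem
    simp only [pvA_processDir, hl]
    rw [pvB_scan, pvItems_eq, pvKeys_eq]
    exact pvA_keyLoop_map m hnd hin [] []

-- B's value fold only ever appends to its accumulator
theorem pvB_inner_app (vals : List (List (String × List (String × List String)))) (V : List String) :
    pvB_inner vals V = (V ++ (pvB_inner vals []).1, (pvB_inner vals []).2) := by
  induction vals generalizing V with
  | nil => simp [pvB_inner]
  | cons inner rest ih =>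
    cases hv : pvLookup inner "vorhaben" with
    | none => simp [pvB_inner, hv]
    | some vd =>
      simp only [pvB_inner, hv]
      rw [ih (V ++ pvKeys vd), ih ([] ++ pvKeys vd)]
      simp

-- a scan without vorhaben yields no Orte either
theorem pvB_scanItems_nil (its : List (String × List (String × List (String × List (String × List String)))))
    (V O : List String) (h : (pvB_scanItems its V O).1 = []) :
    V = [] ∧ (pvB_scanItems its V O).2 = O := by
  induction its generalizing V O with
  | nil => exact ⟨h, rfl⟩
  | cons p rest ih =>
    obtain ⟨k, entry⟩ := p
    rw [pvB_scanItems, pvB_inner_app] at h ⊢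
    cases hb : (pvB_inner (pvValues entry) []).2 with
    | false =>
      simp only [hb] at h ⊢
      rw [List.append_eq_nil_iff] at h
      exact ⟨h.1, by simp⟩
    | true =>
      simp only [hb] at h ⊢
      obtain ⟨hv, ho⟩ := ih _ _ h
      rw [List.append_eq_nil_iff] at hv
      rw [ho, if_pos (by simp [hv.1, hv.2])]
      exact ⟨hv.1, rfl⟩

theorem pvB_scan_nil (m : List (String × List (String × List (String × List (String × List String)))))
    (h : (pvB_scan m).1 = []) : (pvB_scan m).2 = [] :=
  (pvB_scanItems_nil _ _ _ h).2

-- rsplit preserves the backslash-free root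
theorem pvParentC_root (cs p : List Char) (h : pvParentC cs = some p) :
    p.takeWhile (fun c => c ≠ '\\') = cs.takeWhile (fun c => c ≠ '\\') := by
  induction cs generalizing p with
  | nil => simp [pvParentC] at h
  | cons c cs ih =>
    rw [pvParentC] at h
    cases hc : pvParentC cs with
    | some q =>
      rw [hc] at h
      cases h
      by_cases hb : c = '\\'
      · simp [hb]
      · simpa [hb] using ih q hc
    | none =>
      rw [hc] at h
      by_cases hb : c = '\\'
      · rw [if_pos hb] at h
        cases h
        simp [hb]
      · rw [if_neg hb] at h
        exact absurd h (by simp)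

theorem pvParentC_none_root (cs : List Char) (h : pvParentC cs = none) :
    cs.takeWhile (fun c => c ≠ '\\') = cs := by
  induction cs with
  | nil => simp
  | cons c cs ih =>
    rw [pvParentC] at h
    cases hc : pvParentC cs with
    | some q => rw [hc] at h; exact absurd h (by simp)
    | none =>
      rw [hc] at h
      by_cases hb : c = '\\'
      · rw [if_pos hb] at h; exact absurd h (by simp)
      · have h2 : ∀ x ∈ cs, ¬x = '\\' := by simpa using ih hc
        simpa [hb] using h2

theorem pvRoot_rsplit (s : String)
    (subdirs : List String)
    (h : String.ofList (s.toList.takeWhile (fun c => c ≠ '\\')) ∉ subdirs) :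
    String.ofList ((pvRsplit1 s).toList.takeWhile (fun c => c ≠ '\\')) ∉ subdirs := by
  cases hp : pvParentC s.toList with
  | none =>
    have he : pvRsplit1 s = s := by unfold pvRsplit1; rw [hp]
    rw [he]; exact h
  | some p =>
    have he : pvRsplit1 s = String.ofList p := by unfold pvRsplit1; rw [hp]
    rw [he, String.toList_ofList, pvParentC_root _ _ hp]; exact h

-- at the fixed point of rsplit the whole string is its backslash-free root
theorem pvRsplit1_fixed_root (s : String) (h : pvRsplit1 s = s) :
    String.ofList (s.toList.takeWhile (fun c => c ≠ '\\')) = s := by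
  cases hp : pvParentC s.toList with
  | none => rw [pvParentC_none_root _ hp]; exact String.ofList_toList
  | some p =>
    exfalso
    have hlt : (pvRsplit1 s).toList.length < s.toList.length := by
      have he : pvRsplit1 s = String.ofList p := by unfold pvRsplit1; rw [hp]
      rw [he, String.toList_ofList]; exact pvParentC_some_length _ _ hp
    rw [h] at hlt
    exact absurd hlt (lt_irrefl _)

-- A's while-loop from the empty state is B's find over the chain, gated on membership
set_option maxHeartbeats 1000000 in
theorem pvA_while_eq (vorhDict : List (String × List (String × List (String × List (String × List (String × List String)))))) (subdirectories : List String)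
    (hpre : ∀ p ∈ vorhDict, (p.2.map Prod.fst).Nodup ∧ ∀ q ∈ p.2, (q.2.map Prod.fst).Nodup)
    (n : Nat) (h : String) (hn : h.toList.length ≤ n)
    (hroot : String.ofList (h.toList.takeWhile (fun c => c ≠ '\\')) ∉ subdirectories) :
    pvA_while vorhDict subdirectories h [] [] =
      if h ∈ subdirectories then pvB_find vorhDict (pvB_chain subdirectories h) else ([], []) := by
  induction n generalizing h with
  | zero =>
    have hh : h.toList = [] := List.eq_nil_iff_length_eq_zero.mpr (Nat.le_zero.mp hn)
    have he : h = "" := by simpa using congrArg String.ofList hh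
    subst he
    have hnm : ("" : String) ∉ subdirectories := by simpa using hroot
    rw [pvA_while, if_neg (by simp [hnm]), if_neg hnm]
  | succ n ih =>
    by_cases hm : h ∈ subdirectories
    · have hne : String.ofList (h.toList.takeWhile (fun c => c ≠ '\\')) ≠ h := by
        intro e; apply hroot; rw [e]; exact hm
      have hpne : pvRsplit1 h ≠ h := fun e => hne (pvRsplit1_fixed_root h e)
      have hlt : (pvRsplit1 h).toList.length < h.toList.length := pvRsplit1_ne_length h hpne
      have hrootp := pvRoot_rsplit h subdirectories hroot
      have hih := ih (pvRsplit1 h) (by omega) hrootp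
      rw [pvA_while, if_pos (by simp [hm]), dif_pos hlt, pvA_processDir_eq _ _ hpre, if_pos hm,
        pvB_chain, pvB_find]
      cases hl : pvLookup vorhDict h with
      | none =>
        simp only [hl]
        rw [hih]
        by_cases hm2 : pvRsplit1 h ∈ subdirectories
        · have hc2 : subdirectories.contains (pvRsplit1 h) = true := List.contains_iff_mem.mpr hm2
          rw [if_pos hm2, dif_neg (fun hor => hor.elim hpne (fun hnc => hnc hc2))]
        · have hc2 : ¬ subdirectories.contains (pvRsplit1 h) = true :=
            fun hx => hm2 (List.contains_iff_mem.mp hx)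
          rw [if_neg hm2, dif_pos (Or.inr hc2)]
          rfl
      | some m =>
        simp only [hl]
        by_cases hS : (pvB_scan m).1 = []
        · have hS2 := pvB_scan_nil m hS
          rw [hS, hS2, if_pos (by simp [hS]), hih]
          by_cases hm2 : pvRsplit1 h ∈ subdirectories
          · have hc2 : subdirectories.contains (pvRsplit1 h) = true := List.contains_iff_mem.mpr hm2
            rw [if_pos hm2, dif_neg (fun hor => hor.elim hpne (fun hnc => hnc hc2))]
          · have hc2 : ¬ subdirectories.contains (pvRsplit1 h) = true :=
              fun hx => hm2 (List.contains_iff_mem.mp hx)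
            rw [if_neg hm2, dif_pos (Or.inr hc2)]
            rfl
        · have hSe : (pvB_scan m).1.isEmpty = false := by
            simpa [List.isEmpty_iff] using hS
          rw [if_neg (by simp [hSe]), pvA_while, if_neg (by simp [hSe])]
    · rw [pvA_while, if_neg (by simp [hm]), if_neg hm]

-- ===== VERDICT (by name: the statement is the Claim_ definition above) =====
set_option maxHeartbeats 1000000 in
theorem getVorhabenListFuerDirectory_spec : Claim_equal_getVorhabenListFuerDirectory := by
  intro pfad vorhDict subdirectories _ hpre
  obtain ⟨hnd, hroot⟩ := hpre
  unfold Spec_getVorhabenListFuerDirectory getVorhabenListFuerDirectory getVorhabenListFuerDirectory_alt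
  rw [pvA_processDir_eq _ _ hnd, pvB_chain, pvB_find]
  have hrootp := pvRoot_rsplit pfad subdirectories hroot
  have key : pvA_while vorhDict subdirectories (pvRsplit1 pfad) [] [] =
      pvB_find vorhDict (if _h : pvRsplit1 pfad = pfad ∨ ¬ subdirectories.contains (pvRsplit1 pfad)
        then [] else pvB_chain subdirectories (pvRsplit1 pfad)) := by
    rw [pvA_while_eq vorhDict subdirectories hnd ((pvRsplit1 pfad).toList.length) _ le_rfl hrootp]
    by_cases hm2 : pvRsplit1 pfad ∈ subdirectories
    · have hc2 : subdirectories.contains (pvRsplit1 pfad) = true := List.contains_iff_mem.mpr hm2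
      have hpne : pvRsplit1 pfad ≠ pfad := by
        intro e
        exact (pvRsplit1_fixed_root pfad e ▸ hroot) (e ▸ hm2)
      rw [if_pos hm2, dif_neg (fun hor => hor.elim hpne (fun hnc => hnc hc2))]
    · have hc2 : ¬ subdirectories.contains (pvRsplit1 pfad) = true :=
        fun hx => hm2 (List.contains_iff_mem.mp hx)
      rw [if_neg hm2, dif_pos (Or.inr hc2)]
      rfl
  cases hl : pvLookup vorhDict pfad with
  | none =>
    simp only [hl]
    simpa using key
  | some m =>
    simp only [hl]
    by_cases hS : (pvB_scan m).1 = []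
    · have hS2 := pvB_scan_nil m hS
      rw [hS, hS2, if_pos (by simp [hS]), if_pos (by simp [hS])]
      exact key
    · have hSe : (pvB_scan m).1.isEmpty = false := by
        simpa [List.isEmpty_iff] using hS
      rw [if_neg (by simp [hSe]), if_neg (by simp [hSe])]
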